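-- pv_equiv track=rewrite | github.com/Afei99357/test_andrew_nifi_converter | nifi2py/converters/attributes.py | _convert_date_format
-- ===== SOURCE A (Python) =====
-- def _convert_date_format(nifi_format: str) -> str:
--     """
--     Convert NiFi date format to Python strftime format.
--
--     Args:
--         nifi_format: NiFi/Java date format
--
--     Returns:
--         Python strftime format
--     """
--     # Common mappings
--     mappings = {
--         'yyyy': '%Y',
--         'yy': '%y',
--         'MM': '%m',
--         'dd': '%d',
--         'HH': '%H',
--         'mm': '%M',
--         'ss': '%S',
--         'SSS': '%f',
--         'a': '%p',
--     }
--
--     result = nifi_format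
--     for nifi_pat, python_pat in mappings.items():
--         result = result.replace(nifi_pat, python_pat)
--
--     return result
-- ===== SOURCE B (Python) =====
-- # Three single left-to-right scan passes instead of nine full-string .replace() passes.
-- # Patterns are grouped so that a pattern which can match text produced by an earlier
-- # replacement (mm after MM -> '%m', SSS after ss -> '%S') is kept in a later pass,
-- # which preserves the sequential-replace semantics exactly.
-- _GROUPS = [
--     [('yyyy', '%Y'), ('yy', '%y'), ('MM', '%m'), ('dd', '%d'), ('HH', '%H')],
--     [('mm', '%M'), ('ss', '%S')],
--     [('SSS', '%f'), ('a', '%p')],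
-- ]
--
--
-- def _convert_date_format(nifi_format: str) -> str:
--     """
--     Convert NiFi date format to Python strftime format.
--
--     Args:
--         nifi_format: NiFi/Java date format
--
--     Returns:
--         Python strftime format
--     """
--     result = nifi_format
--     for group in _GROUPS:
--         out = []
--         i = 0
--         n = len(result)
--         while i < n:
--             for pat, rep in group:
--                 if result.startswith(pat, i):
--                     out.append(rep)
--                     i += len(pat)
--                     break
--             else:
--                 out.append(result[i])
--                 i += 1
--         result = ''.join(out)
--     return result
-- ===== Notes on version B (the rewrite author's own statement) =====
-- stated objective: alternative
-- what changed: Replaces nine sequential full-string .replace() passes with three single left-to-right multi-pattern scan passes, grouping the patterns so that a pattern able to match text produced by an earlier replacement (mm after MM, SSS after ss) runs in a later pass, preserving the sequential-replace semantics exactly.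
import Mathlib
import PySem

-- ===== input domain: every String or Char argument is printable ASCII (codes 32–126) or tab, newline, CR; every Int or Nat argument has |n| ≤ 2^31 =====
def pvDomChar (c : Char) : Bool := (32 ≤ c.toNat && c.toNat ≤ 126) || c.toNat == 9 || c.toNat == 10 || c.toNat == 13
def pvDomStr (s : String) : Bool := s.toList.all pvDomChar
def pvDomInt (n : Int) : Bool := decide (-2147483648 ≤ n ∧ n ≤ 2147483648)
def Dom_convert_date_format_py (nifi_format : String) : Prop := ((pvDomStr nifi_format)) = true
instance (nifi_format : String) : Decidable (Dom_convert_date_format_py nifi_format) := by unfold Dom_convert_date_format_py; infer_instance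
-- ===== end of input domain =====

-- B replaces A's nine sequential full-string replace passes with three single left-to-right
-- multi-pattern scan passes, grouped so that a pattern able to match text produced by an
-- earlier replacement runs in a later pass; proved to return A's exact value on every string.


-- ===== PORT A =====
def convert_date_format_py (nifi_format : String) : String :=
  let mappings : PySem.Dict String String :=
    ((((((((PySem.Dict.empty.insert "yyyy" "%Y").insert "yy" "%y").insert "MM" "%m").insert
        "dd" "%d").insert "HH" "%H").insert "mm" "%M").insert "ss" "%S").insert
        "SSS" "%f").insert "a" "%p"
  mappings.items.foldl (fun result p => PySem.Str.replace result p.1 p.2) nifi_format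

-- ===== PORT B =====
-- Source B: three scan passes; each is one left-to-right pass trying its group's patterns
-- in priority order at each position (the inner while/for loop of Source B)
def scan1 : List Char → List Char
  | 'y'::'y'::'y'::'y'::t => '%'::'Y'::scan1 t
  | 'y'::'y'::t => '%'::'y'::scan1 t
  | 'M'::'M'::t => '%'::'m'::scan1 t
  | 'd'::'d'::t => '%'::'d'::scan1 t
  | 'H'::'H'::t => '%'::'H'::scan1 t
  | c::t => c :: scan1 t
  | [] => []

def scan2 : List Char → List Char
  | 'm'::'m'::t => '%'::'M'::scan2 t
  | 's'::'s'::t => '%'::'S'::scan2 t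
  | c::t => c :: scan2 t
  | [] => []

def scan3 : List Char → List Char
  | 'S'::'S'::'S'::t => '%'::'f'::scan3 t
  | 'a'::t => '%'::'p'::scan3 t
  | c::t => c :: scan3 t
  | [] => []

def convert_date_format_py_alt (nifi_format : String) : String :=
  String.ofList (scan3 (scan2 (scan1 nifi_format.toList)))

-- ===== PRECONDITION & SPEC =====
def Spec_convert_date_format_py (nifi_format : String) (out : String) : Prop :=
  out = convert_date_format_py_alt nifi_format
instance (nifi_format : String) (out : String) : Decidable (Spec_convert_date_format_py nifi_format out) := by
  unfold Spec_convert_date_format_py; infer_instance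

-- ===== CLAIM (what is proved, stated in full; the proofs are below) =====
def Claim_equal_convert_date_format_py : Prop := ∀ (nifi_format : String), Dom_convert_date_format_py nifi_format → Spec_convert_date_format_py nifi_format (convert_date_format_py nifi_format)

-- ===== LEMMAS AND PROOFS =====

def rep (o : Char) (os new : List Char) : List Char → List Char
  | [] => []
  | c :: t =>
    if (o::os).isPrefixOf (c::t) then new ++ rep o os new (t.drop os.length)
    else c :: rep o os new t
termination_by l => l.length
decreasing_by all_goals (simp; try omega)

theorem go_eq_rep (o : Char) (os new : List Char) :
    ∀ (fuel : Nat) (l acc : List Char), l.length ≤ fuel →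
      PySem.Chars.replace.go (o::os) new fuel l acc = acc.reverse ++ rep o os new l := by
  intro fuel
  induction fuel with
  | zero => intro l acc h; simp at h; simp [h, PySem.Chars.replace.go, rep]
  | succ n ih =>
    intro l acc h
    cases l with
    | nil => simp [PySem.Chars.replace.go, rep]
    | cons c t =>
      rw [PySem.Chars.replace.go]
      by_cases hp : (o::os).isPrefixOf (c::t)
      · rw [if_pos hp, rep, if_pos hp]
        have : (List.drop (o::os).length (c::t)) = t.drop os.length := by simp
        rw [this, ih _ _ (by simp at h ⊢; omega)]
        simp
      · rw [if_neg hp, rep, if_neg hp, ih _ _ (by simp at h; omega)]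
        simp

theorem chars_replace_eq_rep (o : Char) (os new l : List Char) :
    PySem.Chars.replace l (o::os) new = rep o os new l := by
  rw [PySem.Chars.replace]
  simp [go_eq_rep o os new l.length l [] (Nat.le_refl _)]

theorem rep_skip (o : Char) (os new : List Char) (c : Char) (t : List Char) (h : c ≠ o) :
    rep o os new (c::t) = c :: rep o os new t := by
  rw [rep, if_neg]
  simp [List.isPrefixOf]
  intro h'; exact absurd h'.symm h

theorem rep_nomatch (o : Char) (os new : List Char) (c : Char) (t : List Char)
    (h : (o::os).isPrefixOf (c::t) = false) :
    rep o os new (c::t) = c :: rep o os new t := by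
  rw [rep, if_neg (by simp [h])]

theorem rep_match (o : Char) (os new : List Char) (c : Char) (t : List Char)
    (h : (o::os).isPrefixOf (c::t) = true) :
    rep o os new (c::t) = new ++ rep o os new (t.drop os.length) := by
  rw [rep, if_pos h]

theorem rep_head (o : Char) (os new : List Char) (nw : List Char) (hn : new = '%'::nw) :
    ∀ T : List Char, (rep o os new T).head? = some '%' ∨ (rep o os new T).head? = T.head? := by
  intro T
  cases T with
  | nil => right; simp [rep]
  | cons c t =>
    rw [rep]
    by_cases hp : (o::os).isPrefixOf (c::t)
    · left; simp [hp, hn]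
    · right; simp [hp]

def r1 : List Char → List Char := rep 'y' ['y','y','y'] ['%','Y']
def r2 : List Char → List Char := rep 'y' ['y'] ['%','y']
def r3 : List Char → List Char := rep 'M' ['M'] ['%','m']
def r4 : List Char → List Char := rep 'd' ['d'] ['%','d']
def r5 : List Char → List Char := rep 'H' ['H'] ['%','H']
def r6 : List Char → List Char := rep 'm' ['m'] ['%','M']
def r7 : List Char → List Char := rep 's' ['s'] ['%','S']
def r8 : List Char → List Char := rep 'S' ['S','S'] ['%','f']
def r9 : List Char → List Char := rep 'a' [] ['%','p']

def Alist (l : List Char) : List Char := r9 (r8 (r7 (r6 (r5 (r4 (r3 (r2 (r1 l))))))))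

theorem portA_eq (s : String) : convert_date_format_py s = String.ofList (Alist s.toList) := by
  show (PySem.Dict.items _).foldl _ s = _
  have hitems : (((((((((PySem.Dict.empty.insert "yyyy" "%Y").insert "yy" "%y").insert "MM" "%m").insert
        "dd" "%d").insert "HH" "%H").insert "mm" "%M").insert "ss" "%S").insert
        "SSS" "%f").insert "a" "%p" : PySem.Dict String String).items =
      [("yyyy","%Y"),("yy","%y"),("MM","%m"),("dd","%d"),("HH","%H"),("mm","%M"),("ss","%S"),("SSS","%f"),("a","%p")] := by decide
  rw [hitems]
  simp only [List.foldl]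
  simp only [PySem.Str.replace, String.toList_ofList]
  have c1 : "yyyy".toList = ['y','y','y','y'] := by decide
  have c2 : "yy".toList = ['y','y'] := by decide
  have c3 : "MM".toList = ['M','M'] := by decide
  have c4 : "dd".toList = ['d','d'] := by decide
  have c5 : "HH".toList = ['H','H'] := by decide
  have c6 : "mm".toList = ['m','m'] := by decide
  have c7 : "ss".toList = ['s','s'] := by decide
  have c8 : "SSS".toList = ['S','S','S'] := by decide
  have c9 : "a".toList = ['a'] := by decide
  have e1 : "%Y".toList = ['%','Y'] := by decide
  have e2 : "%y".toList = ['%','y'] := by decide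
  have e3 : "%m".toList = ['%','m'] := by decide
  have e4 : "%d".toList = ['%','d'] := by decide
  have e5 : "%H".toList = ['%','H'] := by decide
  have e6 : "%M".toList = ['%','M'] := by decide
  have e7 : "%S".toList = ['%','S'] := by decide
  have e8 : "%f".toList = ['%','f'] := by decide
  have e9 : "%p".toList = ['%','p'] := by decide
  rw [c1,c2,c3,c4,c5,c6,c7,c8,c9,e1,e2,e3,e4,e5,e6,e7,e8,e9]
  simp only [chars_replace_eq_rep]
  simp only [Alist, r1, r2, r3, r4, r5, r6, r7, r8, r9]

theorem skip2 (o : Char) (os new : List Char) (a b : Char) (X : List Char)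
    (ha : a ≠ o) (hb : b ≠ o) :
    rep o os new (a::b::X) = a::b::rep o os new X := by
  rw [rep_skip _ _ _ _ _ ha, rep_skip _ _ _ _ _ hb]

def HOk (t X : List Char) : Prop := X.head? = some '%' ∨ X.head? = t.head?

theorem HOk_refl (t : List Char) : HOk t t := Or.inr rfl

theorem HOk_step (o : Char) (os nw : List Char) {t X : List Char} (h : HOk t X) :
    HOk t (rep o os ('%'::nw) X) := by
  rcases rep_head o os ('%'::nw) nw rfl X with h' | h'
  · exact Or.inl h'
  · rcases h with h'' | h''
    · exact Or.inl (h' ▸ h'')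
    · exact Or.inr (h' ▸ h'')


theorem isPref_false_of_no (l Y : List Char) (h : ∀ u, l ++ u ≠ Y) :
    List.isPrefixOf l Y = false := by
  rw [Bool.eq_false_iff]
  intro hc
  obtain ⟨u, hu⟩ := List.isPrefixOf_iff_prefix.mp hc
  exact h u hu

theorem isPref_head_false (a : Char) (l Y : List Char) (h : Y.head? ≠ some a) :
    List.isPrefixOf (a::l) Y = false := by
  cases Y with
  | nil => rfl
  | cons b u =>
    simp only [List.head?] at h
    simp [List.isPrefixOf]
    intro hb
    exact absurd (congrArg some hb.symm) h

theorem pre_yy_false (t : List Char) (g : ∀ u, t ≠ 'y'::'y'::u) :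
    List.isPrefixOf ['y','y'] t = false :=
  isPref_false_of_no _ _ (fun u hu => g u hu.symm)

theorem pre_y3_false (t : List Char) (g : ∀ u, t ≠ 'y'::'y'::u) :
    List.isPrefixOf ['y','y','y'] t = false := by
  cases t with
  | nil => rfl
  | cons c u =>
    by_cases hc : c = 'y'
    · subst hc
      have hu : u.head? ≠ some 'y' := by
        cases u with
        | nil => simp
        | cons d v =>
          simp only [List.head?]
          intro hd
          exact g v (by simpa using hd)
      simp only [List.isPrefixOf, beq_self_eq_true, Bool.true_and]
      exact isPref_head_false _ _ _ hu
    · simp [List.isPrefixOf]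
      intro h; exact absurd h.symm hc

theorem head_ne_of_g {a : Char} {t : List Char} (g : ∀ u, t = a::u → False) :
    t.head? ≠ some a := by
  cases t with
  | nil => simp
  | cons d v =>
    simp only [List.head?]
    intro hd
    exact g v (by simpa using hd)

theorem rep_nil (o : Char) (os new : List Char) : rep o os new [] = [] := by rw [rep]

theorem HOk_head_ne (a : Char) {t X : List Char} (h : HOk t X) (ha : a ≠ '%')
    (ht : t.head? ≠ some a) : X.head? ≠ some a := by
  rcases h with h | h <;> rw [h]
  · intro hc
    exact ha (Option.some.inj hc).symm
  · exact ht

theorem hok1 (t : List Char) : HOk t (rep 'y' ['y','y','y'] ['%','Y'] t) :=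
  HOk_step _ _ _ (HOk_refl t)
theorem hok2 (t : List Char) :
    HOk t (rep 'y' ['y'] ['%','y'] (rep 'y' ['y','y','y'] ['%','Y'] t)) :=
  HOk_step _ _ _ (hok1 t)
theorem hok3 (t : List Char) :
    HOk t (rep 'M' ['M'] ['%','m'] (rep 'y' ['y'] ['%','y'] (rep 'y' ['y','y','y'] ['%','Y'] t))) :=
  HOk_step _ _ _ (hok2 t)
theorem hok4 (t : List Char) :
    HOk t (rep 'd' ['d'] ['%','d'] (rep 'M' ['M'] ['%','m'] (rep 'y' ['y'] ['%','y']
      (rep 'y' ['y','y','y'] ['%','Y'] t)))) :=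
  HOk_step _ _ _ (hok3 t)
-- ===== group 1: scan1 = HH-pass ∘ dd-pass ∘ MM-pass ∘ yy-pass ∘ yyyy-pass =====

theorem g1_yyyy (t : List Char) :
    r5 (r4 (r3 (r2 (r1 ('y'::'y'::'y'::'y'::t))))) = '%'::'Y'::r5 (r4 (r3 (r2 (r1 t)))) := by
  simp only [r1, r2, r3, r4, r5]
  rw [rep_match _ _ _ _ _ (by simp [List.isPrefixOf])]
  simp only [List.length_cons, List.length_nil, List.drop_succ_cons, List.drop_zero,
    List.cons_append, List.nil_append]
  rw [skip2 _ _ _ _ _ _ (by decide) (by decide), skip2 _ _ _ _ _ _ (by decide) (by decide),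
      skip2 _ _ _ _ _ _ (by decide) (by decide), skip2 _ _ _ _ _ _ (by decide) (by decide)]

theorem g1_yy (t : List Char) (g : ∀ u, t ≠ 'y'::'y'::u) :
    r5 (r4 (r3 (r2 (r1 ('y'::'y'::t))))) = '%'::'y'::r5 (r4 (r3 (r2 (r1 t)))) := by
  simp only [r1, r2, r3, r4, r5]
  rw [rep_nomatch 'y' ['y','y','y'] ['%','Y'] 'y' ('y'::t) (by
        simp only [List.isPrefixOf, beq_self_eq_true, Bool.true_and]
        exact pre_yy_false t g),
      rep_nomatch 'y' ['y','y','y'] ['%','Y'] 'y' t (by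
        simp only [List.isPrefixOf, beq_self_eq_true, Bool.true_and]
        exact pre_y3_false t g),
      rep_match 'y' ['y'] ['%','y'] 'y' ('y'::rep 'y' ['y','y','y'] ['%','Y'] t)
        (by simp [List.isPrefixOf])]
  simp only [List.length_cons, List.length_nil, List.drop_succ_cons, List.drop_zero,
    List.cons_append, List.nil_append]
  rw [skip2 'M' ['M'] ['%','m'] '%' 'y' _ (by decide) (by decide),
      skip2 'd' ['d'] ['%','d'] '%' 'y' _ (by decide) (by decide),
      skip2 'H' ['H'] ['%','H'] '%' 'y' _ (by decide) (by decide)]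

theorem g1_MM (t : List Char) :
    r5 (r4 (r3 (r2 (r1 ('M'::'M'::t))))) = '%'::'m'::r5 (r4 (r3 (r2 (r1 t)))) := by
  simp only [r1, r2, r3, r4, r5]
  rw [skip2 _ _ _ _ _ _ (by decide) (by decide), skip2 _ _ _ _ _ _ (by decide) (by decide),
      rep_match _ _ _ _ _ (by simp [List.isPrefixOf])]
  simp only [List.length_cons, List.length_nil, List.drop_succ_cons, List.drop_zero,
    List.cons_append, List.nil_append]
  rw [skip2 _ _ _ _ _ _ (by decide) (by decide), skip2 _ _ _ _ _ _ (by decide) (by decide)]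

theorem g1_dd (t : List Char) :
    r5 (r4 (r3 (r2 (r1 ('d'::'d'::t))))) = '%'::'d'::r5 (r4 (r3 (r2 (r1 t)))) := by
  simp only [r1, r2, r3, r4, r5]
  rw [skip2 _ _ _ _ _ _ (by decide) (by decide), skip2 _ _ _ _ _ _ (by decide) (by decide),
      skip2 _ _ _ _ _ _ (by decide) (by decide),
      rep_match _ _ _ _ _ (by simp [List.isPrefixOf])]
  simp only [List.length_cons, List.length_nil, List.drop_succ_cons, List.drop_zero,
    List.cons_append, List.nil_append]
  rw [skip2 _ _ _ _ _ _ (by decide) (by decide)]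

theorem g1_HH (t : List Char) :
    r5 (r4 (r3 (r2 (r1 ('H'::'H'::t))))) = '%'::'H'::r5 (r4 (r3 (r2 (r1 t)))) := by
  simp only [r1, r2, r3, r4, r5]
  rw [skip2 _ _ _ _ _ _ (by decide) (by decide), skip2 _ _ _ _ _ _ (by decide) (by decide),
      skip2 _ _ _ _ _ _ (by decide) (by decide), skip2 _ _ _ _ _ _ (by decide) (by decide),
      rep_match _ _ _ _ _ (by simp [List.isPrefixOf])]
  simp only [List.length_cons, List.length_nil, List.drop_succ_cons, List.drop_zero,
    List.cons_append, List.nil_append]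

theorem g1_def (c : Char) (t : List Char)
    (g2 : ∀ u, c = 'y' → t = 'y'::u → False)
    (g3 : ∀ u, c = 'M' → t = 'M'::u → False)
    (g4 : ∀ u, c = 'd' → t = 'd'::u → False)
    (g5 : ∀ u, c = 'H' → t = 'H'::u → False) :
    r5 (r4 (r3 (r2 (r1 (c::t))))) = c :: r5 (r4 (r3 (r2 (r1 t)))) := by
  simp only [r1, r2, r3, r4, r5]
  have e1 : rep 'y' ['y','y','y'] ['%','Y'] (c::t) = c :: rep 'y' ['y','y','y'] ['%','Y'] t := by
    by_cases h : c = 'y'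
    · subst h
      apply rep_nomatch
      simp only [List.isPrefixOf, beq_self_eq_true, Bool.true_and]
      exact isPref_head_false _ _ _ (head_ne_of_g (fun u hu => g2 u rfl hu))
    · exact rep_skip _ _ _ _ _ h
  have e2 : rep 'y' ['y'] ['%','y'] (c :: rep 'y' ['y','y','y'] ['%','Y'] t)
      = c :: rep 'y' ['y'] ['%','y'] (rep 'y' ['y','y','y'] ['%','Y'] t) := by
    by_cases h : c = 'y'
    · subst h
      apply rep_nomatch
      simp only [List.isPrefixOf, beq_self_eq_true, Bool.true_and]
      exact isPref_head_false _ _ _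
        (HOk_head_ne 'y' (hok1 t) (by decide) (head_ne_of_g (fun u hu => g2 u rfl hu)))
    · exact rep_skip _ _ _ _ _ h
  have e3 : rep 'M' ['M'] ['%','m'] (c :: rep 'y' ['y'] ['%','y'] (rep 'y' ['y','y','y'] ['%','Y'] t))
      = c :: rep 'M' ['M'] ['%','m'] (rep 'y' ['y'] ['%','y'] (rep 'y' ['y','y','y'] ['%','Y'] t)) := by
    by_cases h : c = 'M'
    · subst h
      apply rep_nomatch
      simp only [List.isPrefixOf, beq_self_eq_true, Bool.true_and]
      exact isPref_head_false _ _ _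
        (HOk_head_ne 'M' (hok2 t) (by decide) (head_ne_of_g (fun u hu => g3 u rfl hu)))
    · exact rep_skip _ _ _ _ _ h
  have e4 : rep 'd' ['d'] ['%','d'] (c :: rep 'M' ['M'] ['%','m'] (rep 'y' ['y'] ['%','y']
        (rep 'y' ['y','y','y'] ['%','Y'] t)))
      = c :: rep 'd' ['d'] ['%','d'] (rep 'M' ['M'] ['%','m'] (rep 'y' ['y'] ['%','y']
        (rep 'y' ['y','y','y'] ['%','Y'] t))) := by
    by_cases h : c = 'd'
    · subst h
      apply rep_nomatch
      simp only [List.isPrefixOf, beq_self_eq_true, Bool.true_and]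
      exact isPref_head_false _ _ _
        (HOk_head_ne 'd' (hok3 t) (by decide) (head_ne_of_g (fun u hu => g4 u rfl hu)))
    · exact rep_skip _ _ _ _ _ h
  have e5 : rep 'H' ['H'] ['%','H'] (c :: rep 'd' ['d'] ['%','d'] (rep 'M' ['M'] ['%','m']
        (rep 'y' ['y'] ['%','y'] (rep 'y' ['y','y','y'] ['%','Y'] t))))
      = c :: rep 'H' ['H'] ['%','H'] (rep 'd' ['d'] ['%','d'] (rep 'M' ['M'] ['%','m']
        (rep 'y' ['y'] ['%','y'] (rep 'y' ['y','y','y'] ['%','Y'] t)))) := by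
    by_cases h : c = 'H'
    · subst h
      apply rep_nomatch
      simp only [List.isPrefixOf, beq_self_eq_true, Bool.true_and]
      exact isPref_head_false _ _ _
        (HOk_head_ne 'H' (hok4 t) (by decide) (head_ne_of_g (fun u hu => g5 u rfl hu)))
    · exact rep_skip _ _ _ _ _ h
  rw [e1, e2, e3, e4, e5]

theorem scan1_yy (t : List Char) (g : ∀ u, t = 'y'::'y'::u → False) :
    scan1 ('y'::'y'::t) = '%'::'y'::scan1 t := by
  rw [scan1.eq_def]
  split
  · rename_i h; injection h with h1 h; injection h with h2 h; exact (g _ h).elim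
  · rename_i h; injection h with h1 h; injection h with h2 h; rw [h]
  · rename_i h; injection h with h1 _; exact absurd h1 (by decide)
  · rename_i h; injection h with h1 _; exact absurd h1 (by decide)
  · rename_i h; injection h with h1 _; exact absurd h1 (by decide)
  · rename_i gA gB gC gD gE h
    injection h with h1 h2
    exact (gB _ h1.symm h2.symm).elim
  · rename_i h; simp at h

theorem scan1_def (c : Char) (t : List Char)
    (g2 : ∀ u, c = 'y' → t = 'y'::u → False)
    (g3 : ∀ u, c = 'M' → t = 'M'::u → False)
    (g4 : ∀ u, c = 'd' → t = 'd'::u → False)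
    (g5 : ∀ u, c = 'H' → t = 'H'::u → False) :
    scan1 (c::t) = c :: scan1 t := by
  rw [scan1.eq_def]
  split
  · rename_i h; injection h with h1 h; exact (g2 _ h1 (by rw [h])).elim
  · rename_i h; injection h with h1 h; exact (g2 _ h1 (by rw [h])).elim
  · rename_i h; injection h with h1 h; exact (g3 _ h1 (by rw [h])).elim
  · rename_i h; injection h with h1 h; exact (g4 _ h1 (by rw [h])).elim
  · rename_i h; injection h with h1 h; exact (g5 _ h1 (by rw [h])).elim
  · rename_i h; injection h with h1 h; rw [h1, h]
  · rename_i h; simp at h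

theorem L1 (l : List Char) : r5 (r4 (r3 (r2 (r1 l)))) = scan1 l := by
  induction l using scan1.induct with
  | case1 t ih => rw [g1_yyyy, show scan1 ('y'::'y'::'y'::'y'::t) = '%'::'Y'::scan1 t from rfl, ih]
  | case2 t g ih => rw [g1_yy t (fun u hu => g u hu), scan1_yy t (fun u hu => g u hu), ih]
  | case3 t ih => rw [g1_MM, show scan1 ('M'::'M'::t) = '%'::'m'::scan1 t from rfl, ih]
  | case4 t ih => rw [g1_dd, show scan1 ('d'::'d'::t) = '%'::'d'::scan1 t from rfl, ih]
  | case5 t ih => rw [g1_HH, show scan1 ('H'::'H'::t) = '%'::'H'::scan1 t from rfl, ih]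
  | case6 c t g1 g2 g3 g4 g5 ih =>
    rw [g1_def c t g2 g3 g4 g5, scan1_def c t g2 g3 g4 g5, ih]
  | case7 => simp only [r1, r2, r3, r4, r5, rep_nil]; rfl

-- ===== group 2: scan2 = ss-pass ∘ mm-pass =====

theorem g2_mm (t : List Char) :
    r7 (r6 ('m'::'m'::t)) = '%'::'M'::r7 (r6 t) := by
  simp only [r6, r7]
  rw [rep_match _ _ _ _ _ (by simp [List.isPrefixOf])]
  simp only [List.length_cons, List.length_nil, List.drop_succ_cons, List.drop_zero,
    List.cons_append, List.nil_append]
  rw [skip2 _ _ _ _ _ _ (by decide) (by decide)]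

theorem g2_ss (t : List Char) :
    r7 (r6 ('s'::'s'::t)) = '%'::'S'::r7 (r6 t) := by
  simp only [r6, r7]
  rw [skip2 _ _ _ _ _ _ (by decide) (by decide),
      rep_match _ _ _ _ _ (by simp [List.isPrefixOf])]
  simp only [List.length_cons, List.length_nil, List.drop_succ_cons, List.drop_zero,
    List.cons_append, List.nil_append]

theorem g2_def (c : Char) (t : List Char)
    (gm : ∀ u, c = 'm' → t = 'm'::u → False)
    (gs : ∀ u, c = 's' → t = 's'::u → False) :
    r7 (r6 (c::t)) = c :: r7 (r6 t) := by
  simp only [r6, r7]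
  have e6 : rep 'm' ['m'] ['%','M'] (c::t) = c :: rep 'm' ['m'] ['%','M'] t := by
    by_cases h : c = 'm'
    · subst h
      apply rep_nomatch
      simp only [List.isPrefixOf, beq_self_eq_true, Bool.true_and]
      exact isPref_head_false _ _ _ (head_ne_of_g (fun u hu => gm u rfl hu))
    · exact rep_skip _ _ _ _ _ h
  have e7 : rep 's' ['s'] ['%','S'] (c :: rep 'm' ['m'] ['%','M'] t)
      = c :: rep 's' ['s'] ['%','S'] (rep 'm' ['m'] ['%','M'] t) := by
    by_cases h : c = 's'
    · subst h
      apply rep_nomatch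
      simp only [List.isPrefixOf, beq_self_eq_true, Bool.true_and]
      exact isPref_head_false _ _ _
        (HOk_head_ne 's' (HOk_step _ _ _ (HOk_refl t)) (by decide)
          (head_ne_of_g (fun u hu => gs u rfl hu)))
    · exact rep_skip _ _ _ _ _ h
  rw [e6, e7]

theorem scan2_def (c : Char) (t : List Char)
    (gm : ∀ u, c = 'm' → t = 'm'::u → False)
    (gs : ∀ u, c = 's' → t = 's'::u → False) :
    scan2 (c::t) = c :: scan2 t := by
  rw [scan2.eq_def]
  split
  · rename_i h; injection h with h1 h; exact (gm _ h1 (by rw [h])).elim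
  · rename_i h; injection h with h1 h; exact (gs _ h1 (by rw [h])).elim
  · rename_i h; injection h with h1 h; rw [h1, h]
  · rename_i h; simp at h

theorem L2 (l : List Char) : r7 (r6 l) = scan2 l := by
  induction l using scan2.induct with
  | case1 t ih => rw [g2_mm, show scan2 ('m'::'m'::t) = '%'::'M'::scan2 t from rfl, ih]
  | case2 t ih => rw [g2_ss, show scan2 ('s'::'s'::t) = '%'::'S'::scan2 t from rfl, ih]
  | case3 c t gm gs ih => rw [g2_def c t gm gs, scan2_def c t gm gs, ih]
  | case4 => simp only [r6, r7, rep_nil]; rfl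

-- ===== group 3: scan3 = a-pass ∘ SSS-pass =====

theorem g3_SSS (t : List Char) :
    r9 (r8 ('S'::'S'::'S'::t)) = '%'::'f'::r9 (r8 t) := by
  simp only [r8, r9]
  rw [rep_match _ _ _ _ _ (by simp [List.isPrefixOf])]
  simp only [List.length_cons, List.length_nil, List.drop_succ_cons, List.drop_zero,
    List.cons_append, List.nil_append]
  rw [skip2 _ _ _ _ _ _ (by decide) (by decide)]

theorem g3_a (t : List Char) :
    r9 (r8 ('a'::t)) = '%'::'p'::r9 (r8 t) := by
  simp only [r8, r9]
  rw [rep_skip _ _ _ _ _ (by decide),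
      rep_match _ _ _ _ _ (by simp [List.isPrefixOf])]
  simp only [List.length_nil, List.drop_zero, List.cons_append, List.nil_append]

theorem g3_def (c : Char) (t : List Char)
    (gS : ∀ u, c = 'S' → t = 'S'::'S'::u → False)
    (ga : c = 'a' → False) :
    r9 (r8 (c::t)) = c :: r9 (r8 t) := by
  simp only [r8, r9]
  have e8 : rep 'S' ['S','S'] ['%','f'] (c::t) = c :: rep 'S' ['S','S'] ['%','f'] t := by
    by_cases h : c = 'S'
    · subst h
      apply rep_nomatch
      simp only [List.isPrefixOf, beq_self_eq_true, Bool.true_and]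
      exact isPref_false_of_no _ _ (fun u hu => gS u rfl hu.symm)
    · exact rep_skip _ _ _ _ _ h
  have e9 : rep 'a' [] ['%','p'] (c :: rep 'S' ['S','S'] ['%','f'] t)
      = c :: rep 'a' [] ['%','p'] (rep 'S' ['S','S'] ['%','f'] t) :=
    rep_skip _ _ _ _ _ (fun hc => ga hc)
  rw [e8, e9]

theorem scan3_def (c : Char) (t : List Char)
    (gS : ∀ u, c = 'S' → t = 'S'::'S'::u → False)
    (ga : c = 'a' → False) :
    scan3 (c::t) = c :: scan3 t := by
  rw [scan3.eq_def]
  split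
  · rename_i h; injection h with h1 h; exact (gS _ h1 (by rw [h])).elim
  · rename_i h; injection h with h1 h; exact (ga h1).elim
  · rename_i h; injection h with h1 h; rw [h1, h]
  · rename_i h; simp at h

theorem L3 (l : List Char) : r9 (r8 l) = scan3 l := by
  induction l using scan3.induct with
  | case1 t ih => rw [g3_SSS, show scan3 ('S'::'S'::'S'::t) = '%'::'f'::scan3 t from rfl, ih]
  | case2 t ih => rw [g3_a, show scan3 ('a'::t) = '%'::'p'::scan3 t from rfl, ih]
  | case3 c t gS ga ih => rw [g3_def c t gS ga, scan3_def c t gS ga, ih]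
  | case4 => simp only [r8, r9, rep_nil]; rfl

-- ===== VERDICT (by name: the statement is the Claim_ definition above) =====
theorem convert_date_format_py_spec : Claim_equal_convert_date_format_py := by
  intro s _
  show convert_date_format_py s = convert_date_format_py_alt s
  rw [portA_eq, convert_date_format_py_alt]
  simp only [Alist]
  rw [L1, L2, L3]
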